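-- pv_equiv track=rewrite | github.com/dmdekf/algo | 05_Stack_1/workwhop/485233/programmers_42588_algo_bf.py | solution
-- ===== SOURCE A (Python) =====
-- def solution(heights):
--     answer = []
--     for i in range(len(heights)):
--         for j in range(i,-1,-1):
--             if heights[i] < heights[j]:
--                 answer.append(j+1)
--                 break
--             else:
--                 answer.append(0)
--
--     return answer
-- ===== SOURCE B (Python) =====
-- def solution(heights):
--     answer = []
--     stack = []  # indices with strictly decreasing heights, top at end
--     for i in range(len(heights)):
--         h = heights[i]
--         while stack and heights[stack[-1]] <= h:
--             stack.pop()
--         if stack: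
--             k = stack[-1]
--             answer.extend([0] * (i - k))
--             answer.append(k + 1)
--         else:
--             answer.extend([0] * (i + 1))
--         stack.append(i)
--     return answer
-- ===== Notes on version B (the rewrite author's own statement) =====
-- stated objective: alternative
-- what changed: Replaces the per-index backward rescan (nested loops) with a single forward pass maintaining a monotonic stack of previous-greater candidate indices, emitting each zero-run in bulk.
import Mathlib
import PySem

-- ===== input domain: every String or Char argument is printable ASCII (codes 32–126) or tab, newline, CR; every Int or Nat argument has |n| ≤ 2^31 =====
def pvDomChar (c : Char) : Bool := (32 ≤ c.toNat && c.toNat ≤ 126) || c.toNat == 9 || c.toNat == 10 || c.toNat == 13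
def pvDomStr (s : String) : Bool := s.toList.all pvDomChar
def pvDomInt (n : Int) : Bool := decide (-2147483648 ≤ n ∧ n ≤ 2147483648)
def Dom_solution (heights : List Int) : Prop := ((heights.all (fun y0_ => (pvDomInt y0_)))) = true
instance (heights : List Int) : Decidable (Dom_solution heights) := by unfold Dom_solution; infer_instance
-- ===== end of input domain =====

-- B replaces A's per-index backward rescan with a single forward pass over a monotonic
-- stack of previous-greater candidate indices (objective: alternative algorithm, same output).

-- ===== PORT A =====
-- inner loop 'for j in range(i,-1,-1): …' with break; indices i, j are always in
-- range, so 'pyGetD … 0' is exact for Python's heights[i], heights[j]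
def aInner (H : List Int) (i : Int) : List Int → List Int → List Int
  | acc, [] => acc
  | acc, j :: js =>
      if PySem.List.pyGetD H i 0 < PySem.List.pyGetD H j 0 then acc ++ [j + 1]
      else aInner H i (acc ++ [0]) js

def solution (heights : List Int) : List Int :=
  (PySem.List.pyRange 0 (heights.length : Int) 1).foldl
    (fun answer i => aInner heights i answer (PySem.List.pyRange i (-1) (-1))) []

-- ===== PORT B =====
-- 'while stack and heights[stack[-1]] <= h: stack.pop()' (stack top at head here)
def popWhile (H : List Int) (h : Int) : List Int → List Int
  | [] => []
  | k :: st => if PySem.List.pyGetD H k 0 ≤ h then popWhile H h st else k :: st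

def bStep (H : List Int) : (List Int × List Int) → Int → (List Int × List Int)
  | (answer, stack), i =>
      let h := PySem.List.pyGetD H i 0
      let st := popWhile H h stack
      match st with
      | k :: _ => (answer ++ List.replicate (i - k).toNat 0 ++ [k + 1], i :: st)
      | [] => (answer ++ List.replicate (i + 1).toNat 0, i :: st)

def solution_alt (heights : List Int) : List Int :=
  ((PySem.List.pyRange 0 (heights.length : Int) 1).foldl (bStep heights) ([], [])).1

-- ===== PRECONDITION & SPEC =====
def Spec_solution (heights : List Int) (out : List Int) : Prop := out = solution_alt heights
instance (heights : List Int) (out : List Int) : Decidable (Spec_solution heights out) := by unfold Spec_solution; infer_instance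

-- ===== CLAIM (what is proved, stated in full; the proofs are below) =====
def Claim_equal_solution : Prop := ∀ (heights : List Int), Dom_solution heights → Spec_solution heights (solution heights)

-- ===== LEMMAS AND PROOFS =====

-- previous strictly-greater index: largest j < m with h < H[j]
def pg (H : List Int) (h : Int) : Nat → Option Int
  | 0 => none
  | m + 1 => if h < PySem.List.pyGetD H (m : Int) 0 then some (m : Int) else pg H h m

-- the block of output emitted for one outer index, scanning m positions back
def chunkG (H : List Int) (h : Int) (m : Nat) : List Int :=
  match pg H h m with
  | some k => List.replicate ((m : Int) - 1 - k).toNat 0 ++ [k + 1]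
  | none => List.replicate m 0

def refOut (H : List Int) : Nat → List Int
  | 0 => []
  | m + 1 => refOut H m ++ chunkG H (PySem.List.pyGetD H (m : Int) 0) (m + 1)

def stk (H : List Int) : Nat → List Int
  | 0 => []
  | m + 1 => (m : Int) :: popWhile H (PySem.List.pyGetD H (m : Int) 0) (stk H m)

theorem pg_bounds (H : List Int) (h : Int) (m : Nat) (k : Int)
    (hk : pg H h m = some k) : 0 ≤ k ∧ k < (m : Int) := by
  induction m with
  | zero => simp [pg] at hk
  | succ m ih =>
      simp only [pg] at hk
      split at hk
      · cases hk; exact ⟨by positivity, by push_cast; omega⟩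
      · rcases ih hk with ⟨h1, h2⟩; refine ⟨h1, by push_cast; omega⟩

theorem aInner_go (H : List Int) (i : Int) (m : Nat) :
    ∀ acc, aInner H i acc (PySem.List.pyRange ((m : Int) - 1) (-1) (-1))
      = acc ++ chunkG H (PySem.List.pyGetD H i 0) m := by
  induction m with
  | zero =>
      intro acc
      rw [PySem.List.pyRange_neg_one_eq_nil (by norm_num)]
      simp [aInner, chunkG, pg]
  | succ m ih =>
      intro acc
      have hcast : ((m + 1 : Nat) : Int) - 1 = (m : Int) := by push_cast; ring
      rw [hcast, PySem.List.pyRange_neg_one_cons (by omega : (-1:Int) < (m : Int))]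
      by_cases hlt : PySem.List.pyGetD H i 0 < PySem.List.pyGetD H (m : Int) 0
      · simp only [aInner]
        rw [if_pos hlt]
        have h0 : (((m + 1 : Nat) : Int) - 1 - (m : Int)).toNat = 0 := by push_cast; omega
        simp only [chunkG, pg, if_pos hlt, h0, List.replicate_zero, List.nil_append]
      · simp only [aInner]
        rw [if_neg hlt, ih]
        have hch : chunkG H (PySem.List.pyGetD H i 0) (m + 1)
            = 0 :: chunkG H (PySem.List.pyGetD H i 0) m := by
          simp only [chunkG, pg, if_neg hlt]
          cases hpg : pg H (PySem.List.pyGetD H i 0) m with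
          | none =>
              show List.replicate (m + 1) 0 = 0 :: List.replicate m 0
              simp [List.replicate_succ]
          | some k =>
              obtain ⟨hk0, hkm⟩ := pg_bounds H _ m k hpg
              show List.replicate (((m + 1 : Nat) : Int) - 1 - k).toNat 0 ++ [k + 1]
                  = 0 :: (List.replicate ((m : Int) - 1 - k).toNat 0 ++ [k + 1])
              rw [show (((m + 1 : Nat) : Int) - 1 - k).toNat
                  = ((m : Int) - 1 - k).toNat + 1 from by push_cast; omega,
                List.replicate_succ]
              simp
        rw [hch]
        simp

theorem popWhile_popWhile (H : List Int) (h1 h2 : Int) (hle : h1 ≤ h2) (l : List Int) :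
    popWhile H h2 (popWhile H h1 l) = popWhile H h2 l := by
  induction l with
  | nil => rfl
  | cons k st ih =>
      by_cases hk : PySem.List.pyGetD H k 0 ≤ h1
      · simp [popWhile, hk, le_trans hk hle, ih]
      · simp [popWhile, hk]

theorem head_popWhile (H : List Int) (m : Nat) (h : Int) :
    (popWhile H h (stk H m)).head? = pg H h m := by
  induction m with
  | zero => rfl
  | succ m ih =>
      by_cases hc : PySem.List.pyGetD H (m : Int) 0 ≤ h
      · simp only [stk, popWhile, pg]
        rw [if_pos hc, if_neg (not_lt.mpr hc), popWhile_popWhile H _ _ hc, ih]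
      · simp only [stk, popWhile, pg]
        rw [if_neg hc, if_pos (not_le.mp hc)]
        rfl

theorem bfold (H : List Int) (m : Nat) :
    (PySem.List.pyRange 0 (m : Int) 1).foldl (bStep H) ([], []) = (refOut H m, stk H m) := by
  induction m with
  | zero => simp [PySem.List.pyRange_one_eq_nil, refOut, stk]
  | succ m ih =>
      have hcast : ((m + 1 : Nat) : Int) = (m : Int) + 1 := by push_cast; ring
      rw [hcast, PySem.List.pyRange_one_succ_right (by positivity), List.foldl_append, ih]
      simp only [List.foldl_cons, List.foldl_nil, bStep]
      cases hst : popWhile H (PySem.List.pyGetD H (m : Int) 0) (stk H m) with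
      | nil =>
          have hpg : pg H (PySem.List.pyGetD H (m : Int) 0) m = none := by
            rw [← head_popWhile, hst]; rfl
          have hpg1 : pg H (PySem.List.pyGetD H (m : Int) 0) (m + 1) = none := by
            simp only [pg, if_neg (lt_irrefl _)]; exact hpg
          have hch : chunkG H (PySem.List.pyGetD H (m : Int) 0) (m + 1)
              = List.replicate (m + 1) 0 := by
            simp only [chunkG, hpg1]
          show (refOut H m ++ List.replicate ((m : Int) + 1).toNat 0, [(m : Int)])
              = (refOut H (m + 1), stk H (m + 1))
          refine Prod.ext ?_ ?_
          · show refOut H m ++ List.replicate ((m : Int) + 1).toNat 0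
                = refOut H m ++ chunkG H (PySem.List.pyGetD H (m : Int) 0) (m + 1)
            rw [hch, show ((m : Int) + 1).toNat = m + 1 from by omega]
          · show [(m : Int)] = stk H (m + 1)
            simp only [stk, hst]
      | cons k rest =>
          have hpg : pg H (PySem.List.pyGetD H (m : Int) 0) m = some k := by
            rw [← head_popWhile, hst]; rfl
          have hpg1 : pg H (PySem.List.pyGetD H (m : Int) 0) (m + 1) = some k := by
            simp only [pg, if_neg (lt_irrefl _)]; exact hpg
          have hch : chunkG H (PySem.List.pyGetD H (m : Int) 0) (m + 1)
              = List.replicate ((m : Int) - k).toNat 0 ++ [k + 1] := by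
            simp only [chunkG, hpg1]
            rw [show ((m + 1 : Nat) : Int) - 1 - k = (m : Int) - k from by push_cast; ring]
          show (refOut H m ++ List.replicate ((m : Int) - k).toNat 0 ++ [k + 1],
                (m : Int) :: k :: rest)
              = (refOut H (m + 1), stk H (m + 1))
          refine Prod.ext ?_ ?_
          · show refOut H m ++ List.replicate ((m : Int) - k).toNat 0 ++ [k + 1]
                = refOut H m ++ chunkG H (PySem.List.pyGetD H (m : Int) 0) (m + 1)
            rw [hch, List.append_assoc]
          · show (m : Int) :: k :: rest = stk H (m + 1)
            simp only [stk, hst]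

theorem afold (H : List Int) (m : Nat) :
    (PySem.List.pyRange 0 (m : Int) 1).foldl
      (fun answer i => aInner H i answer (PySem.List.pyRange i (-1) (-1))) []
      = refOut H m := by
  induction m with
  | zero => simp [PySem.List.pyRange_one_eq_nil, refOut]
  | succ m ih =>
      have hcast : ((m + 1 : Nat) : Int) = (m : Int) + 1 := by push_cast; ring
      rw [hcast, PySem.List.pyRange_one_succ_right (by positivity), List.foldl_append, ih]
      simp only [List.foldl_cons, List.foldl_nil]
      have h1 : ((m + 1 : Nat) : Int) - 1 = (m : Int) := by push_cast; ring
      have hgo := aInner_go H (m : Int) (m + 1) (refOut H m)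
      rw [h1] at hgo
      rw [hgo]
      rfl

-- ===== VERDICT (by name: the statement is the Claim_ definition above) =====
theorem solution_spec : Claim_equal_solution := by
  intro heights _
  unfold Spec_solution solution solution_alt
  rw [afold, bfold]
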